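-- pv_equiv track=rewrite | github.com/rafikatten29/foobar | challenge1/googleSplitPie.py | solution
-- ===== SOURCE A (Python) =====
-- def solution(sol):
--
--     result = 1
--     for iteration in range (len(sol)):  # This shifts the string so after the first iteration the last char becomes the first
--         new_sol = sol[iteration:] + sol[:iteration]
--         result = checkPattern(new_sol)
--         if (result != 1):
--             break
--     return result
--
-- def checkPattern(sol):
--     number_of_pieces = 1
--     number_of_iterations = 0
--     number_of_iterations = int(len(sol) / 2) + 1
--     for length_of_substring in range (1, number_of_iterations):
--         if (len(sol) % length_of_substring == 0):
--             number_of_pieces = int(len(sol) / length_of_substring)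
--             firstSubstring = sol[0:length_of_substring]
--             foundAnswer = True
--             for piece in range (number_of_pieces):
--                 start_positon = piece*length_of_substring
--                 end_position = length_of_substring+(piece*length_of_substring)
--                 if(sol[start_positon:end_position] != firstSubstring):
--                     foundAnswer = False
--                     number_of_pieces = 1
--             if (foundAnswer):
--                 break
--     return number_of_pieces
-- ===== SOURCE B (Python) =====
-- def solution(sol):
--     # Rotating a string never changes how many equal blocks it splits into,
--     # so scan divisors of len(sol) once: the smallest block length p is the
--     # first divisor where sol aligns with itself shifted by p.
--     n = len(sol)
--     for p in range(1, n // 2 + 1):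
--         if n % p == 0 and sol[p:] == sol[:n - p]:
--             return n // p
--     return 1
-- ===== Notes on version B (the rewrite author's own statement) =====
-- stated objective: faster
-- what changed: A tries every rotation of the string and, per rotation, every divisor length with a per-piece slice comparison; B drops the rotation loop entirely (rotations preserve the repeat-block count) and checks each divisor p of n with a single self-overlap comparison sol[p:] == sol[:n-p].
import Mathlib
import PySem

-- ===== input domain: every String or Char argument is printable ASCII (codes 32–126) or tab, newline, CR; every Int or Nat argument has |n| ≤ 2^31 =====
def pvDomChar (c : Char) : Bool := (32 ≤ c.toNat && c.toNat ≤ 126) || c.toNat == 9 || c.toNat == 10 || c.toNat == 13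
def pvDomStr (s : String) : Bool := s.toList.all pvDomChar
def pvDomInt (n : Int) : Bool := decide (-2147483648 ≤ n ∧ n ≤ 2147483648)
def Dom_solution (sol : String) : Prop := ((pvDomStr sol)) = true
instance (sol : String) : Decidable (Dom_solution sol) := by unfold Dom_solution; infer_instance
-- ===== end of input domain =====

-- B drops A's rotation loop (rotations preserve the block count) and replaces the
-- per-piece scan by one self-overlap comparison per divisor; objective: faster.

-- ===== PORT A =====
-- inner loop of checkPattern: state = (foundAnswer, number_of_pieces)
def checkPatternInner (l : List Char) (p : Int) (first : List Char) (k : Int) : Bool × Int :=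
  (PySem.List.pyRange 0 k 1).foldl
    (fun st piece =>
      if PySem.List.slice l (some (piece * p)) (some (p + piece * p)) ≠ first then (false, 1)
      else st)
    (true, k)

-- outer loop of checkPattern over length_of_substring, carrying number_of_pieces; `break` = return
def checkPatternLoop (l : List Char) (ps : List Int) (pieces : Int) : Int :=
  match ps with
  | [] => pieces
  | p :: rest =>
    let n : Int := (l.length : Int)
    if PySem.Int.mod n p = 0 then
      -- Python's int(len(sol)/p): exact floor division since p divides len(sol)
      let k := PySem.Int.floordiv n p
      let st := checkPatternInner l p (PySem.List.slice l (some 0) (some p)) k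
      if st.1 then st.2 else checkPatternLoop l rest st.2
    else checkPatternLoop l rest pieces

def checkPattern (l : List Char) : Int :=
  -- int(len(sol)/2) + 1: exact floor division on the sampled lengths
  checkPatternLoop l (PySem.List.pyRange 1 (PySem.Int.floordiv (l.length : Int) 2 + 1) 1) 1

-- the for-loop of solution; `break` = return current result
def solutionLoop (l : List Char) (its : List Int) (result : Int) : Int :=
  match its with
  | [] => result
  | i :: rest =>
    let r := checkPattern (PySem.List.slice l (some i) none ++ PySem.List.slice l none (some i))
    if r ≠ 1 then r else solutionLoop l rest r

def solution (sol : String) : Int :=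
  solutionLoop sol.toList (PySem.List.pyRange 0 (sol.toList.length : Int) 1) 1

-- ===== PORT B =====
-- Source B's loop: first divisor p of n with sol[p:] == sol[:n-p] wins; early return = recursion
def altLoop (l : List Char) (ps : List Int) : Int :=
  match ps with
  | [] => 1
  | p :: rest =>
    let n : Int := (l.length : Int)
    if PySem.Int.mod n p = 0 ∧
        PySem.List.slice l (some p) none = PySem.List.slice l none (some (n - p)) then
      PySem.Int.floordiv n p
    else altLoop l rest

def solution_alt (sol : String) : Int :=
  altLoop sol.toList (PySem.List.pyRange 1 (PySem.Int.floordiv (sol.toList.length : Int) 2 + 1) 1)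

-- ===== PRECONDITION & SPEC =====
def Spec_solution (sol : String) (out : Int) : Prop := out = solution_alt sol
instance (sol : String) (out : Int) : Decidable (Spec_solution sol out) := by unfold Spec_solution; infer_instance

-- ===== CLAIM (what is proved, stated in full; the proofs are below) =====
def Claim_equal_solution : Prop := ∀ (sol : String), Dom_solution sol → Spec_solution sol (solution sol)

-- ===== LEMMAS AND PROOFS =====

theorem len_flat_rep (u : List Char) (k : Nat) : ((List.replicate k u).flatten).length = k * u.length := by
  induction k with
  | zero => simp
  | succ k ih => simp [List.replicate_succ, ih]; ring

theorem flat_rep_succ' (u : List Char) (k : Nat) :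
    (List.replicate (k+1) u).flatten = (List.replicate k u).flatten ++ u := by
  rw [List.replicate_succ']; simp

-- P2: per → tile
theorem tile_of_per : ∀ (k : Nat) (l : List Char) (q : Nat), 0 < q → l.length = k * q →
    l.drop q = l.take (l.length - q) → l = (List.replicate k (l.take q)).flatten := by
  intro k
  induction k with
  | zero => intro l q hq hl _; simp at hl; simp [hl]
  | succ k ih =>
    intro l q hq hl hper
    have hexp : (k+1) * q = k * q + q := by ring
    have hql : q ≤ l.length := by omega
    have ht : (l.drop q).length = k * q := by simp [hl]; omega
    have hnq : l.length - q = k * q := by omega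
    have hpre : l.drop q = l.take (k * q) := by rw [← hnq]; exact hper
    rcases Nat.eq_zero_or_pos k with hk | hk
    · subst hk
      have ht0 : l.drop q = [] := List.eq_nil_of_length_eq_zero (by simp [ht])
      conv_lhs => rw [← List.take_append_drop q l]
      rw [ht0]; simp
    · have hkq : q ≤ k * q := by
        have : 1 * q ≤ k * q := Nat.mul_le_mul_right q hk
        omega
      have hpert : (l.drop q).drop q = (l.drop q).take ((l.drop q).length - q) := by
        conv_lhs => rw [hpre, List.drop_take]
        rw [ht]
      have htq : (l.drop q).take q = l.take q := by
        rw [hpre, List.take_take, min_eq_left hkq]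
      have := ih (l.drop q) q hq ht hpert
      rw [htq] at this
      conv_lhs => rw [← List.take_append_drop q l]
      rw [List.replicate_succ, List.flatten_cons, this]

-- P1: tile → per
theorem per_of_tile (l : List Char) (q : Nat) (hq : 0 < q) (hql : q ≤ l.length)
    (hl : l.length = (l.length / q) * q)
    (h : l = (List.replicate (l.length / q) (l.take q)).flatten) :
    l.drop q = l.take (l.length - q) := by
  obtain ⟨kk, hkk⟩ : ∃ kk, l.length / q = kk + 1 :=
    ⟨l.length / q - 1, by have := (Nat.one_le_div_iff hq).mpr hql; omega⟩
  rw [hkk] at h hl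
  have hu : (l.take q).length = q := by simp [hql]
  have h1 : l.drop q = (List.replicate kk (l.take q)).flatten := by
    conv_lhs => rw [h, List.replicate_succ, List.flatten_cons]
    exact List.drop_left' hu
  have h2 : l.take (l.length - q) = (List.replicate kk (l.take q)).flatten := by
    have hnq : l.length - q = kk * q := by
      have : (kk+1) * q = kk * q + q := by ring
      omega
    rw [hnq]
    conv_lhs => rw [h, flat_rep_succ']
    exact List.take_left' (by rw [len_flat_rep, hu])
  rw [h1, h2]

-- drop of j*q blocks
theorem drop_flat_rep (u : List Char) : ∀ (j k : Nat), j ≤ k →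
    ((List.replicate k u).flatten).drop (j * u.length) = (List.replicate (k - j) u).flatten := by
  intro j
  induction j with
  | zero => intro k _; simp
  | succ j ih =>
    intro k hj
    have hmul : (j+1) * u.length = u.length + j * u.length := by ring
    rw [hmul, ← List.drop_drop]
    conv_lhs => rw [show k = (k-1)+1 from by omega, List.replicate_succ, List.flatten_cons,
      List.drop_left]
    rw [ih (k-1) (by omega), show k - 1 - j = k - (j+1) from by omega]

-- P3: tile → pieces
theorem pieces_of_tile (l : List Char) (q : Nat) (hq : 0 < q) (hql : q ≤ l.length)
    (h : l = (List.replicate (l.length / q) (l.take q)).flatten) :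
    ∀ j < l.length / q, (l.drop (j * q)).take q = l.take q := by
  intro j hj
  have hu : (l.take q).length = q := by simp [hql]
  have hd := drop_flat_rep (l.take q) j (l.length / q) (by omega)
  rw [hu] at hd
  conv_lhs => rw [h, hd]
  have hrep : l.length / q - j = (l.length / q - j - 1) + 1 := by omega
  rw [hrep, List.replicate_succ, List.flatten_cons, List.take_left' hu]

-- P4: pieces → tile
theorem tile_of_pieces : ∀ (k : Nat) (l : List Char) (q : Nat), 0 < q → l.length = k * q →
    (∀ j < k, (l.drop (j * q)).take q = l.take q) → l = (List.replicate k (l.take q)).flatten := by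
  intro k
  induction k with
  | zero => intro l q hq hl _; simp at hl; simp [hl]
  | succ k ih =>
    intro l q hq hl hp
    have hexp : (k+1) * q = k * q + q := by ring
    have ht : (l.drop q).length = k * q := by simp [hl]; omega
    rcases Nat.eq_zero_or_pos k with hk | hk
    · subst hk
      have ht0 : l.drop q = [] := List.eq_nil_of_length_eq_zero (by simp [ht])
      conv_lhs => rw [← List.take_append_drop q l]
      rw [ht0]; simp
    · have htq : (l.drop q).take q = l.take q := by
        have := hp 1 (by omega); simpa using this
      have hpt : ∀ j < k, ((l.drop q).drop (j * q)).take q = (l.drop q).take q := by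
        intro j hj
        rw [List.drop_drop, htq]
        have h2 := hp (j+1) (by omega)
        have : q + j * q = (j+1) * q := by ring
        rw [this]
        exact h2
      have := ih (l.drop q) q hq ht hpt
      rw [htq] at this
      conv_lhs => rw [← List.take_append_drop q l]
      rw [List.replicate_succ, List.flatten_cons, this]

theorem rotate_flat_rep_len (u : List Char) (k : Nat) (hk : 1 ≤ k) :
    ((List.replicate k u).flatten).rotate u.length = (List.replicate k u).flatten := by
  have hlen : u.length ≤ ((List.replicate k u).flatten).length := by
    rw [len_flat_rep]
    calc u.length = 1 * u.length := by ring
    _ ≤ k * u.length := Nat.mul_le_mul_right _ hk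
  rw [List.rotate_eq_drop_append_take hlen]
  conv_lhs => rw [show k = (k-1)+1 from by omega, List.replicate_succ, List.flatten_cons,
    List.drop_left, List.take_left]
  rw [← flat_rep_succ', show (k-1)+1 = k from by omega]

theorem rotate_flat_rep_mul (u : List Char) (k : Nat) (hk : 1 ≤ k) : ∀ (m : Nat),
    ((List.replicate k u).flatten).rotate (m * u.length) = (List.replicate k u).flatten := by
  intro m
  induction m with
  | zero => simp
  | succ m ih =>
    have : (m+1) * u.length = m * u.length + u.length := by ring
    rw [this, ← List.rotate_rotate, ih, rotate_flat_rep_len u k hk]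

theorem comm_flat (a b : List Char) : ∀ m, (List.replicate m (a++b)).flatten ++ a = a ++ (List.replicate m (b++a)).flatten := by
  intro m
  induction m with
  | zero => simp
  | succ m ih => simp only [List.replicate_succ, List.flatten_cons, List.append_assoc] at *
                 rw [ih]

theorem rot_helper (a b : List Char) (k : Nat) (hk : 1 ≤ k) :
    ((List.replicate k (a++b)).flatten).rotate a.length = (List.replicate k (b++a)).flatten := by
  have hlen : a.length ≤ ((List.replicate k (a++b)).flatten).length := by
    rw [len_flat_rep]
    calc a.length ≤ (a++b).length := by simp
    _ = 1 * (a++b).length := by ring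
    _ ≤ k * (a++b).length := Nat.mul_le_mul_right _ hk
  rw [List.rotate_eq_drop_append_take hlen]
  conv_lhs => rw [show k = (k-1)+1 from by omega, List.replicate_succ, List.flatten_cons,
    List.append_assoc, List.drop_left, List.take_left]
  conv_rhs => rw [show k = (k-1)+1 from by omega, List.replicate_succ, List.flatten_cons]
  rw [List.append_assoc, comm_flat a b (k-1), ← List.append_assoc]

theorem rotate_flat_rep_small (u : List Char) (k : Nat) (hk : 1 ≤ k) (j : Nat) (hj : j ≤ u.length) :
    ((List.replicate k u).flatten).rotate j = (List.replicate k (u.rotate j)).flatten := by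
  have ha : (u.take j).length = j := by simp [hj]
  have h1 : ((List.replicate k (u.take j ++ u.drop j)).flatten).rotate (u.take j).length
      = (List.replicate k (u.drop j ++ u.take j)).flatten := rot_helper _ _ k hk
  rw [List.take_append_drop, ha] at h1
  rw [h1, List.rotate_eq_drop_append_take hj]

theorem rotate_flat_rep_any (u : List Char) (k : Nat) (hk : 1 ≤ k) (hu : 0 < u.length) (j : Nat) :
    ((List.replicate k u).flatten).rotate j
      = (List.replicate k (u.rotate (j % u.length))).flatten := by
  conv_lhs => rw [show j = (j / u.length) * u.length + j % u.length from by
      rw [Nat.mul_comm]; exact (Nat.div_add_mod j u.length).symm,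
    ← List.rotate_rotate, rotate_flat_rep_mul u k hk]
  exact rotate_flat_rep_small u k hk _ (le_of_lt (Nat.mod_lt _ hu))

def NontrivTile (l : List Char) : Prop :=
  ∃ q : Nat, 0 < q ∧ 2 * q ≤ l.length ∧ q ∣ l.length ∧
    l = (List.replicate (l.length / q) (l.take q)).flatten

theorem rotate_nontriv {l : List Char} {j : Nat} (hj : j ≤ l.length)
    (h : NontrivTile (l.rotate j)) : NontrivTile l := by
  obtain ⟨q, hq, h2q, hdvd, htile⟩ := h
  rw [List.length_rotate] at h2q hdvd htile
  have hql : q ≤ l.length := by omega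
  have hk1 : 1 ≤ l.length / q := (Nat.one_le_div_iff hq).mpr hql
  have hu : ((l.rotate j).take q).length = q := by
    simp [List.length_rotate]; omega
  have hback : (l.rotate j).rotate (l.length - j) = l := by
    rw [List.rotate_rotate, show j + (l.length - j) = l.length from by omega, List.rotate_length]
  have hl : l = (List.replicate (l.length / q)
      (((l.rotate j).take q).rotate ((l.length - j) % ((l.rotate j).take q).length))).flatten := by
    conv_lhs => rw [← hback, htile]
    exact rotate_flat_rep_any _ _ hk1 (by omega) _
  set w := ((l.rotate j).take q).rotate ((l.length - j) % ((l.rotate j).take q).length) with hw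
  have hwl : w.length = q := by rw [hw, List.length_rotate, hu]
  refine ⟨q, hq, h2q, hdvd, ?_⟩
  have hlw : l.take q = w := by
    conv_lhs => rw [hl, show l.length / q = (l.length / q - 1) + 1 from by omega,
      List.replicate_succ, List.flatten_cons]
    exact List.take_left' hwl
  rw [hlw]
  exact hl

-- cast of int(len(sol)/2)
theorem floordiv_len_two (n : Nat) : PySem.Int.floordiv (n : Int) 2 = ((n / 2 : Nat) : Int) := by
  exact_mod_cast PySem.Int.floordiv_natCast n 2

-- the inner for-loop over pieces: (false, 1) is absorbing
theorem inner_absorb (l : List Char) (p : Int) (first : List Char) : ∀ ps : List Int,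
    ps.foldl (fun st piece =>
      if PySem.List.slice l (some (piece * p)) (some (p + piece * p)) ≠ first then (false, 1)
      else st) ((false : Bool), (1 : Int)) = (false, 1) := by
  intro ps
  induction ps with
  | nil => rfl
  | cons x ps ih => simpa using ih

theorem inner_spec (l : List Char) (p : Int) (first : List Char) (kk : Int) : ∀ ps : List Int,
    ps.foldl (fun st piece =>
      if PySem.List.slice l (some (piece * p)) (some (p + piece * p)) ≠ first then (false, 1)
      else st) ((true : Bool), kk)
    = if ∀ x ∈ ps, PySem.List.slice l (some (x * p)) (some (p + x * p)) = first
      then (true, kk) else (false, 1) := by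
  intro ps
  induction ps with
  | nil => simp
  | cons x ps ih =>
    by_cases hx : PySem.List.slice l (some (x * p)) (some (p + x * p)) = first
    · simp only [List.foldl_cons]
      rw [if_neg (by simp [hx]), ih]
      have hiff : (∀ y ∈ x :: ps, PySem.List.slice l (some (y * p)) (some (p + y * p)) = first)
          ↔ (∀ y ∈ ps, PySem.List.slice l (some (y * p)) (some (p + y * p)) = first) := by
        simp [hx]
      exact if_congr hiff.symm rfl rfl
    · simp only [List.foldl_cons]
      rw [if_pos (by simp [hx]), inner_absorb]
      rw [if_neg (by intro h; exact hx (h x (by simp)))]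

theorem pieces_iff_per (l : List Char) (q : Nat) (hq : 0 < q) (hql : q ≤ l.length)
    (hdvd : q ∣ l.length) :
    (∀ j < l.length / q, (l.drop (j * q)).take q = l.take q) ↔
      l.drop q = l.take (l.length - q) := by
  have hl : l.length = (l.length / q) * q := (Nat.div_mul_cancel hdvd).symm
  constructor
  · intro h
    exact per_of_tile l q hq hql hl.symm.symm (tile_of_pieces (l.length / q) l q hq hl h)
  · intro h
    exact pieces_of_tile l q hq hql (tile_of_per (l.length / q) l q hq hl h) 

theorem loop_eq (l : List Char) : ∀ ps : List Int,
    (∀ p ∈ ps, 1 ≤ p ∧ p ≤ ((l.length / 2 : Nat) : Int)) →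
    checkPatternLoop l ps 1 = altLoop l ps := by
  intro ps
  induction ps with
  | nil => intro _; rfl
  | cons p ps ih =>
    intro hb
    obtain ⟨hp1, hp2⟩ := hb p (by simp)
    obtain ⟨q, rfl⟩ : ∃ q : Nat, p = (q : Int) := ⟨p.toNat, by omega⟩
    have hq1 : 1 ≤ q := by exact_mod_cast hp1
    have hq2 : 2 * q ≤ l.length := by
      have : q ≤ l.length / 2 := by exact_mod_cast hp2
      omega
    have hql : q ≤ l.length := by omega
    have ihb : checkPatternLoop l ps 1 = altLoop l ps :=
      ih (fun p' hp' => hb p' (by simp [hp']))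
    rw [checkPatternLoop, altLoop]
    by_cases hdvd : PySem.Int.mod ((l.length : Nat) : Int) (q : Int) = 0
    · have hqdvd : q ∣ l.length := by
        have := (PySem.Int.mod_eq_zero_iff_dvd _ _).mp hdvd
        exact_mod_cast this
      simp only [hdvd, if_pos, checkPatternInner, PySem.Int.floordiv_natCast]
      have hfirst : PySem.List.slice l (some (0 : Int)) (some ((q : Nat) : Int)) = l.take q := by
        rw [PySem.List.slice_zero_start, PySem.List.slice_to_natCast]
      have hslice : ∀ j : Nat,
          PySem.List.slice l (some ((j : Int) * (q : Int))) (some ((q : Int) + (j : Int) * (q : Int)))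
            = (l.drop (j * q)).take q := by
        intro j
        rw [show ((j : Int) * (q : Int)) = (((j * q : Nat)) : Int) from by push_cast; ring,
          show ((q : Int) + (((j * q : Nat)) : Int)) = (((q + j * q : Nat)) : Int) from by push_cast; ring,
          PySem.List.slice_natCast]
        congr 1
        omega
      rw [hfirst, inner_spec]
      have hforall :
          (∀ x ∈ PySem.List.pyRange 0 ((l.length / q : Nat) : Int) 1,
            PySem.List.slice l (some (x * (q : Int))) (some ((q : Int) + x * (q : Int))) = l.take q)
          ↔ (∀ j < l.length / q, (l.drop (j * q)).take q = l.take q) := by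
        constructor
        · intro h j hj
          have hx := h (j : Int) (PySem.List.mem_pyRange_one.mpr ⟨by positivity, by exact_mod_cast hj⟩)
          rwa [hslice j] at hx
        · intro h x hx
          obtain ⟨hx0, hx1⟩ := PySem.List.mem_pyRange_one.mp hx
          obtain ⟨j, rfl⟩ : ∃ j : Nat, x = (j : Int) := ⟨x.toNat, by omega⟩
          rw [hslice j]
          exact h j (by exact_mod_cast hx1)
      have hslper : (PySem.List.slice l (some ((q : Nat) : Int)) none
          = PySem.List.slice l none (some ((l.length : Int) - ((q : Nat) : Int))))
          ↔ l.drop q = l.take (l.length - q) := by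
        rw [PySem.List.slice_from_natCast,
          show ((l.length : Int) - ((q : Nat) : Int)) = (((l.length - q : Nat)) : Int) from by omega,
          PySem.List.slice_to_natCast]
      by_cases hper : l.drop q = l.take (l.length - q)
      · have hpieces := (pieces_iff_per l q (by omega) hql hqdvd).mpr hper
        rw [if_pos (hforall.mpr hpieces)]
        have hC : True ∧ (PySem.List.slice l (some ((q : Nat) : Int)) none
            = PySem.List.slice l none (some ((l.length : Int) - ((q : Nat) : Int)))) :=
          ⟨trivial, hslper.mpr hper⟩
        rw [if_pos hC]
        simp
      · have hnp : ¬ (∀ x ∈ PySem.List.pyRange 0 ((l.length / q : Nat) : Int) 1,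
            PySem.List.slice l (some (x * (q : Int))) (some ((q : Int) + x * (q : Int))) = l.take q) := by
          intro hcon
          exact hper ((pieces_iff_per l q (by omega) hql hqdvd).mp (hforall.mp hcon))
        rw [if_neg hnp]
        rw [show (if ((false : Bool), (1 : Int)).1 = true then ((false : Bool), (1 : Int)).2
            else checkPatternLoop l ps ((false : Bool), (1 : Int)).2) = checkPatternLoop l ps 1
          from by simp]
        rw [if_neg (show ¬ (True ∧ PySem.List.slice l (some ((q : Nat) : Int)) none
            = PySem.List.slice l none (some ((l.length : Int) - ((q : Nat) : Int))))
          from fun hc => hper (hslper.mp hc.2))]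
        exact ihb
    · rw [if_neg hdvd, if_neg (by intro hc; exact hdvd hc.1)]
      exact ihb

theorem checkPattern_eq_alt (l : List Char) :
    checkPattern l = altLoop l (PySem.List.pyRange 1 (PySem.Int.floordiv (l.length : Int) 2 + 1) 1) := by
  rw [checkPattern]
  refine loop_eq l _ ?_
  intro p hp
  rw [floordiv_len_two] at hp
  have := PySem.List.mem_pyRange_one.mp hp
  omega

-- the per-divisor success condition of B, in Nat form
theorem alt_cond_iff (l : List Char) (q : Nat) (hq1 : 1 ≤ q) (hq2 : q ≤ l.length) :
    (PySem.Int.mod (l.length : Int) (q : Int) = 0 ∧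
      PySem.List.slice l (some (q : Int)) none
        = PySem.List.slice l none (some ((l.length : Int) - (q : Int)))) ↔
    (q ∣ l.length ∧ l.drop q = l.take (l.length - q)) := by
  rw [PySem.Int.mod_eq_zero_iff_dvd, Int.natCast_dvd_natCast,
    PySem.List.slice_from_natCast,
    show ((l.length : Int) - (q : Int)) = ((l.length - q : Nat) : Int) from by omega,
    PySem.List.slice_to_natCast]

theorem alt_exists_of_ne_one (l : List Char) : ∀ ps : List Int,
    altLoop l ps ≠ 1 →
    ∃ p ∈ ps, PySem.Int.mod (l.length : Int) p = 0 ∧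
      PySem.List.slice l (some p) none
        = PySem.List.slice l none (some ((l.length : Int) - p)) := by
  intro ps
  induction ps with
  | nil => intro h; exact absurd rfl h
  | cons p ps ih =>
    intro h
    rw [altLoop] at h
    by_cases hc : PySem.Int.mod ((l.length : Nat) : Int) p = 0 ∧
        PySem.List.slice l (some p) none
          = PySem.List.slice l none (some (((l.length : Nat) : Int) - p))
    · exact ⟨p, by simp, hc⟩
    · rw [if_neg hc] at h
      obtain ⟨p', hp', hc'⟩ := ih h
      exact ⟨p', by simp [hp'], hc'⟩

theorem alt_ne_one_of_cond (l : List Char) : ∀ ps : List Int,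
    (∀ p ∈ ps, 1 ≤ p ∧ p ≤ ((l.length / 2 : Nat) : Int)) →
    (∃ p ∈ ps, PySem.Int.mod (l.length : Int) p = 0 ∧
      PySem.List.slice l (some p) none
        = PySem.List.slice l none (some ((l.length : Int) - p))) →
    altLoop l ps ≠ 1 := by
  intro ps
  induction ps with
  | nil => intro _ h; simp at h
  | cons p ps ih =>
    intro hb hex
    rw [altLoop]
    by_cases hc : PySem.Int.mod ((l.length : Nat) : Int) p = 0 ∧
        PySem.List.slice l (some p) none
          = PySem.List.slice l none (some (((l.length : Nat) : Int) - p))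
    · rw [if_pos hc]
      -- value is n // p with p ≤ n/2 and p ∣ n, hence ≥ 2
      obtain ⟨hp1, hp2⟩ := hb p (by simp)
      obtain ⟨q, rfl⟩ : ∃ q : Nat, p = (q : Int) := ⟨p.toNat, by omega⟩
      have hdvd : q ∣ l.length := by
        have := (PySem.Int.mod_eq_zero_iff_dvd _ _).mp hc.1
        exact_mod_cast this
      have hq2 : 2 * q ≤ l.length := by
        have : q ≤ l.length / 2 := by exact_mod_cast hp2
        omega
      have h2 : 2 ≤ l.length / q :=
        (Nat.le_div_iff_mul_le (k := q) (by omega)).mpr (by omega)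
      rw [PySem.Int.floordiv_natCast]
      intro hcontra
      have : (l.length / q : Int) = 1 := by exact_mod_cast hcontra
      omega
    · rw [if_neg hc]
      refine ih (fun p' hp' => hb p' (by simp [hp'])) ?_
      obtain ⟨p', hp', hc'⟩ := hex
      rcases List.mem_cons.mp hp' with rfl | hmem
      · exact absurd hc' hc
      · exact ⟨p', hmem, hc'⟩

theorem alt_ne_one_iff (l : List Char) :
    altLoop l (PySem.List.pyRange 1 (PySem.Int.floordiv (l.length : Int) 2 + 1) 1) ≠ 1 ↔
      NontrivTile l := by
  constructor
  · intro h
    obtain ⟨p, hp, hc⟩ := alt_exists_of_ne_one l _ h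
    rw [floordiv_len_two] at hp
    have hm := PySem.List.mem_pyRange_one.mp hp
    obtain ⟨q, rfl⟩ : ∃ q : Nat, p = (q : Int) := ⟨p.toNat, by omega⟩
    have hq1 : 1 ≤ q := by exact_mod_cast hm.1
    have hq2 : q ≤ l.length / 2 := by
      have h2 := hm.2
      have : (q : Int) < ((l.length / 2 : Nat) : Int) + 1 := h2
      omega
    have h2q : 2 * q ≤ l.length := by omega
    have hql : q ≤ l.length := by omega
    obtain ⟨hdvd, hper⟩ := (alt_cond_iff l q hq1 hql).mp hc
    exact ⟨q, by omega, h2q, hdvd,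
      tile_of_per (l.length / q) l q (by omega) (Nat.div_mul_cancel hdvd).symm hper⟩
  · rintro ⟨q, hq, h2q, hdvd, htile⟩
    have hql : q ≤ l.length := by omega
    have hper := per_of_tile l q hq hql (Nat.div_mul_cancel hdvd).symm htile
    refine alt_ne_one_of_cond l _ ?_
      ⟨(q : Int), ?_, (alt_cond_iff l q (by omega) hql).mpr ⟨hdvd, hper⟩⟩
    · intro p hp
      rw [floordiv_len_two] at hp
      have hm := PySem.List.mem_pyRange_one.mp hp
      exact ⟨hm.1, by omega⟩
    · rw [floordiv_len_two]
      refine PySem.List.mem_pyRange_one.mpr ⟨by exact_mod_cast hq, ?_⟩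
      have : q ≤ l.length / 2 := by omega
      omega

theorem solutionLoop_all_one (l : List Char) : ∀ its : List Int,
    (∀ i ∈ its, checkPattern (PySem.List.slice l (some i) none ++ PySem.List.slice l none (some i)) = 1) →
    solutionLoop l its 1 = 1 := by
  intro its
  induction its with
  | nil => intro _; rfl
  | cons i its ih =>
    intro h
    rw [solutionLoop]
    simp only [h i (by simp), ne_eq, not_true_eq_false, if_false]
    exact ih (fun i' hi' => h i' (by simp [hi']))

theorem main_list (l : List Char) :
    solutionLoop l (PySem.List.pyRange 0 (l.length : Int) 1) 1
      = altLoop l (PySem.List.pyRange 1 (PySem.Int.floordiv (l.length : Int) 2 + 1) 1) := by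
  by_cases h : altLoop l (PySem.List.pyRange 1 (PySem.Int.floordiv (l.length : Int) 2 + 1) 1) = 1
  · rw [h]
    apply solutionLoop_all_one
    intro i hi
    have hm := PySem.List.mem_pyRange_one.mp hi
    obtain ⟨j, rfl⟩ : ∃ j : Nat, i = (j : Int) := ⟨i.toNat, by omega⟩
    have hj : j ≤ l.length := by
      have := hm.2
      omega
    have hrot : PySem.List.slice l (some (j : Int)) none
        ++ PySem.List.slice l none (some (j : Int)) = l.rotate j := by
      rw [PySem.List.slice_from_natCast, PySem.List.slice_to_natCast,
        List.rotate_eq_drop_append_take hj]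
    rw [hrot, checkPattern_eq_alt]
    by_contra hne
    exact ((alt_ne_one_iff l).mpr
      (rotate_nontriv hj ((alt_ne_one_iff (l.rotate j)).mp hne))) h
  · have hn : 0 < l.length := by
      by_contra h0
      have hl0 : l.length = 0 := by omega
      rw [hl0] at h
      exact h (by rw [floordiv_len_two]; rfl)
    rw [PySem.List.pyRange_one_cons (by exact_mod_cast hn), solutionLoop]
    have hrot0 : PySem.List.slice l (some (0 : Int)) none
        ++ PySem.List.slice l none (some (0 : Int)) = l := by
      rw [PySem.List.slice_zero_start, PySem.List.slice_none_none,
        PySem.List.slice_to l (le_refl 0)]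
      simp
    rw [hrot0, checkPattern_eq_alt, if_pos h]

-- ===== VERDICT (by name: the statement is the Claim_ definition above) =====
theorem solution_spec : Claim_equal_solution := by
  intro sol _
  unfold Spec_solution solution solution_alt
  exact main_list sol.toList
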